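-- pv_equiv track=rewrite | github.com/Viraj281105/Nexus2.0-MedGuard | backend/services/cghs_checker.py | get_cghs_rate
-- ===== SOURCE A (Python) =====
-- from typing import Optional
--
-- CGHS_RATES = {
--     # PATHOLOGY / LAB
--     "complete blood count": 120,
--     "haemoglobin": 30,
--     "blood sugar fasting": 30,
--     "blood sugar post prandial": 30,
--     "hba1c": 200,
--     "lipid profile": 150,
--     "liver function test": 150,
--     "kidney function test": 150,
--     "serum creatinine": 40,
--     "uric acid": 50,
--     "thyroid function test": 300,
--     "tsh": 150,
--     "urine routine examination": 30,
--     "urine culture sensitivity": 150,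
--     "blood culture sensitivity": 300,
--     "widal test": 60,
--     "dengue ns1 antigen": 600,
--     "dengue igm igg": 600,
--     "malaria antigen test": 50,
--     "covid rt pcr": 500,
--     "vitamin d": 600,
--     "vitamin b12": 400,
--     "serum calcium": 50,
--     "serum electrolytes": 100,
--     "prothrombin time": 80,
--     "esr": 30,
--     "hiv test": 100,
--     "hepatitis b surface antigen": 100,
--     "hepatitis c antibody": 200,
--     "psa": 400,
--
--     # RADIOLOGY / IMAGING
--     "x ray chest": 100,
--     "x ray abdomen": 100,
--     "x ray spine": 120,
--     "x ray knee": 100,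
--     "ultrasound abdomen": 400,
--     "ultrasound pelvis": 400,
--     "ultrasound obstetric": 400,
--     "echocardiography": 900,
--     "ecg": 80,
--     "2d echo": 900,
--     "ct scan head": 1800,
--     "ct scan chest": 2200,
--     "ct scan abdomen": 2200,
--     "mri brain": 2800,
--     "mri spine": 3000,
--     "mri knee": 3000,
--     "doppler study": 800,
--
--     # PROCEDURES / CONSULTATIONS
--     "physiotherapy per session": 100,
--     "specialist consultation": 300,
--     "general consultation": 150,
-- }
--
-- def get_cghs_rate(procedure_name: str) -> Optional[tuple]:
--     """
--     Returns (matched_procedure, cghs_rate) or None if no match found.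
--     Uses substring and keyword matching for flexibility.
--     """
--     procedure_lower = procedure_name.lower().strip()
--
--     best_match = None
--     best_score = 0
--
--     for cghs_name, rate in CGHS_RATES.items():
--         # Direct substring match
--         if cghs_name in procedure_lower or procedure_lower in cghs_name:
--             return (cghs_name, rate)
--
--         # Keyword overlap score
--         cghs_words = set(cghs_name.split())
--         bill_words = set(procedure_lower.split())
--         overlap = len(cghs_words & bill_words)
--
--         if overlap > best_score:
--             best_score = overlap
--             best_match = (cghs_name, rate)
--
--     # Only return if at least 2 keywords matched
--     if best_score >= 2:
--         return best_match
--
--     # Single keyword match as last resort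
--     if best_score == 1 and best_match:
--         return best_match
--
--     return None
-- ===== SOURCE B (Python) =====
-- from typing import Optional
--
-- CGHS_RATES = {
--     "complete blood count": 120,
--     "haemoglobin": 30,
--     "blood sugar fasting": 30,
--     "blood sugar post prandial": 30,
--     "hba1c": 200,
--     "lipid profile": 150,
--     "liver function test": 150,
--     "kidney function test": 150,
--     "serum creatinine": 40,
--     "uric acid": 50,
--     "thyroid function test": 300,
--     "tsh": 150,
--     "urine routine examination": 30,
--     "urine culture sensitivity": 150,
--     "blood culture sensitivity": 300,
--     "widal test": 60,
--     "dengue ns1 antigen": 600,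
--     "dengue igm igg": 600,
--     "malaria antigen test": 50,
--     "covid rt pcr": 500,
--     "vitamin d": 600,
--     "vitamin b12": 400,
--     "serum calcium": 50,
--     "serum electrolytes": 100,
--     "prothrombin time": 80,
--     "esr": 30,
--     "hiv test": 100,
--     "hepatitis b surface antigen": 100,
--     "hepatitis c antibody": 200,
--     "psa": 400,
--     "x ray chest": 100,
--     "x ray abdomen": 100,
--     "x ray spine": 120,
--     "x ray knee": 100,
--     "ultrasound abdomen": 400,
--     "ultrasound pelvis": 400,
--     "ultrasound obstetric": 400,
--     "echocardiography": 900,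
--     "ecg": 80,
--     "2d echo": 900,
--     "ct scan head": 1800,
--     "ct scan chest": 2200,
--     "ct scan abdomen": 2200,
--     "mri brain": 2800,
--     "mri spine": 3000,
--     "mri knee": 3000,
--     "doppler study": 800,
--     "physiotherapy per session": 100,
--     "specialist consultation": 300,
--     "general consultation": 150
-- }
--
-- # Precomputed once at import: the entries in order, and an inverted index
-- # mapping each table word to the indices of the entries containing it.
-- _ITEMS = list(CGHS_RATES.items())
-- _WORD_INDEX = {}
-- for _i, (_name, _rate) in enumerate(_ITEMS):
--     for _w in _name.split():
--         _WORD_INDEX.setdefault(_w, []).append(_i)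
--
-- def get_cghs_rate(procedure_name: str) -> Optional[tuple]:
--     """Inverted-index rewrite: a substring pass; then per-entry overlap counts
--     accumulated through the prebuilt word->entry-indices index; then a single
--     argmax scan over the counts, returned only if the best count is >= 1."""
--     query = procedure_name.lower().strip()
--     for name, rate in CGHS_RATES.items():
--         if name in query or query in name:
--             return (name, rate)
--     counts = [0] * len(_ITEMS)
--     for w in set(query.split()):
--         for i in _WORD_INDEX.get(w, ()):
--             counts[i] += 1
--     best, best_c = None, 0
--     for item, c in zip(_ITEMS, counts):
--         if c > best_c:
--             best, best_c = item, c
--     return best if best_c >= 1 else None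
-- ===== Notes on version B (the rewrite author's own statement) =====
-- stated objective: faster
-- what changed: A scores each table entry by building and intersecting word sets per entry inside one interleaved loop; B precomputes an inverted word->entry-indices index once, accumulates per-entry overlap counts by walking only the index lists of the query's words, and picks the best entry in a final argmax scan (substring pass kept separate up front).
import Mathlib
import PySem

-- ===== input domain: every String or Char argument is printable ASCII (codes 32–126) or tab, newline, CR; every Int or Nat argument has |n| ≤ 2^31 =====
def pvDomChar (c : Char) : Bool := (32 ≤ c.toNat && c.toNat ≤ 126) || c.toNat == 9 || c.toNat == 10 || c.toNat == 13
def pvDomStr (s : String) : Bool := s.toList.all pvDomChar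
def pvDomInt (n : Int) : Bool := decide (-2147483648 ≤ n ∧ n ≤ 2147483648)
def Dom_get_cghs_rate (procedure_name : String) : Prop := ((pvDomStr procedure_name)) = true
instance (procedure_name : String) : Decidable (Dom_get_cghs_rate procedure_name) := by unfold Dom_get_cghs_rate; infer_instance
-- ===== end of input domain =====

-- B replaces A's per-entry word-set intersections with a prebuilt inverted
-- word->entry-indices index, per-entry overlap counts accumulated from the index,
-- and a final argmax scan (objective: faster, measured).

-- ===== PORT A =====
-- the CGHS_RATES dict, in insertion order (shared table constant of both Pythons)
def cghsRates : List (String × Int) := [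
  ("complete blood count", 120),
  ("haemoglobin", 30),
  ("blood sugar fasting", 30),
  ("blood sugar post prandial", 30),
  ("hba1c", 200),
  ("lipid profile", 150),
  ("liver function test", 150),
  ("kidney function test", 150),
  ("serum creatinine", 40),
  ("uric acid", 50),
  ("thyroid function test", 300),
  ("tsh", 150),
  ("urine routine examination", 30),
  ("urine culture sensitivity", 150),
  ("blood culture sensitivity", 300),
  ("widal test", 60),
  ("dengue ns1 antigen", 600),
  ("dengue igm igg", 600),
  ("malaria antigen test", 50),
  ("covid rt pcr", 500),
  ("vitamin d", 600),
  ("vitamin b12", 400),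
  ("serum calcium", 50),
  ("serum electrolytes", 100),
  ("prothrombin time", 80),
  ("esr", 30),
  ("hiv test", 100),
  ("hepatitis b surface antigen", 100),
  ("hepatitis c antibody", 200),
  ("psa", 400),
  ("x ray chest", 100),
  ("x ray abdomen", 100),
  ("x ray spine", 120),
  ("x ray knee", 100),
  ("ultrasound abdomen", 400),
  ("ultrasound pelvis", 400),
  ("ultrasound obstetric", 400),
  ("echocardiography", 900),
  ("ecg", 80),
  ("2d echo", 900),
  ("ct scan head", 1800),
  ("ct scan chest", 2200),
  ("ct scan abdomen", 2200),
  ("mri brain", 2800),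
  ("mri spine", 3000),
  ("mri knee", 3000),
  ("doppler study", 800),
  ("physiotherapy per session", 100),
  ("specialist consultation", 300),
  ("general consultation", 150)
]

-- A's  len(set(cghs_name.split()) & set(procedure_lower.split()))
def pvOverlap (pl : String) (cghsName : String) : Int :=
  PySem.Set.len (PySem.Set.inter (PySem.Set.ofList (PySem.Str.split₀ cghsName))
    (PySem.Set.ofList (PySem.Str.split₀ pl)))

-- A's for-loop with its (best_match, best_score) state and the trailing >=2 / ==1 checks
def pvLoopA (pl : String) : List (String × Int) → Option (String × Int) → Int → Option (String × Int)
  | [], best, score =>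
      if 2 ≤ score then best
      else if score = 1 ∧ best.isSome = true then best
      else none
  | nr :: rest, best, score =>
      if PySem.Str.isIn nr.1 pl || PySem.Str.isIn pl nr.1 then some nr
      else
        let ov : Int := pvOverlap pl nr.1
        if score < ov then pvLoopA pl rest (some nr) ov
        else pvLoopA pl rest best score

def get_cghs_rate (procedure_name : String) : Option (String × Int) :=
  pvLoopA (PySem.Str.strip (PySem.Str.lower procedure_name)) cghsRates none 0

-- ===== PORT B =====
-- B's module-level index build: _WORD_INDEX.setdefault(w, []).append(i) appends i to the
-- word's list, creating the key at the end if absent — exactly insert w (getD w [] ++ [i])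
-- (PySem.Dict.insert keeps an existing key's position and appends a new one).
def pvAddWord (i : Nat) (d : PySem.Dict String (List Nat)) (w : String) : PySem.Dict String (List Nat) :=
  d.insert w (d.getD w [] ++ [i])

-- 'for _i, (_name, _rate) in enumerate(_ITEMS): for _w in _name.split(): …'
def pvBuildIdx : Nat → List (String × Int) → PySem.Dict String (List Nat) → PySem.Dict String (List Nat)
  | _, [], d => d
  | i, nr :: rest, d => pvBuildIdx (i + 1) rest ((PySem.Str.split₀ nr.1).foldl (pvAddWord i) d)

def pvWordIndex : PySem.Dict String (List Nat) := pvBuildIdx 0 cghsRates PySem.Dict.empty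

-- 'for i in _WORD_INDEX.get(w, ()): counts[i] += 1'  (counts[i] read as getD i 0: every
-- stored index is < len(counts) by construction, so the Python never raises IndexError)
def pvBump (v : List Int) (L : List Nat) : List Int :=
  L.foldl (fun v i => v.set i (v.getD i 0 + 1)) v

-- counts = [0]*len(_ITEMS), then the loop over set(query.split())
def pvCounts (query : String) : List Int :=
  (PySem.Set.ofList (PySem.Str.split₀ query)).foldl
    (fun v w => pvBump v (pvWordIndex.getD w [])) (List.replicate cghsRates.length 0)

def get_cghs_rate_alt (procedure_name : String) : Option (String × Int) :=
  let query := PySem.Str.strip (PySem.Str.lower procedure_name)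
  match cghsRates.find? (fun nr => PySem.Str.isIn nr.1 query || PySem.Str.isIn query nr.1) with
  | some nr => some nr
  | none =>
      -- 'for item, c in zip(_ITEMS, counts): if c > best_c: best, best_c = item, c'
      let best := (cghsRates.zip (pvCounts query)).foldl
        (fun (st : Option (String × Int) × Int) p => if st.2 < p.2 then (some p.1, p.2) else st)
        (none, 0)
      if 1 ≤ best.2 then best.1 else none

-- ===== PRECONDITION & SPEC =====
def Spec_get_cghs_rate (procedure_name : String) (out : Option (String × Int)) : Prop := out = get_cghs_rate_alt procedure_name
instance (procedure_name : String) (out : Option (String × Int)) : Decidable (Spec_get_cghs_rate procedure_name out) := by unfold Spec_get_cghs_rate; infer_instance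

-- ===== CLAIM (what is proved, stated in full; the proofs are below) =====
def Claim_equal_get_cghs_rate : Prop := ∀ (procedure_name : String), Dom_get_cghs_rate procedure_name → Spec_get_cghs_rate procedure_name (get_cghs_rate procedure_name)

-- ===== LEMMAS AND PROOFS =====

theorem pvOverlap_nonneg (pl n : String) : 0 ≤ pvOverlap pl n := by
  simp [pvOverlap, PySem.Set.len]

-- the running state of a first-argmax pass over the entries
def pvStep (pl : String) (acc : Option (String × Int)) (x : String × Int) : Option (String × Int) :=
  match acc with
  | none => some x
  | some m => if pvOverlap pl m.1 < pvOverlap pl x.1 then some x else some m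

-- invariant tying A's (best, score) state to the first-argmax accumulator
def pvInv (pl : String) (b : Option (String × Int)) (s : Int) (acc : Option (String × Int)) : Prop :=
  (b = none ∧ s = 0 ∧ (acc = none ∨ ∃ m, acc = some m ∧ pvOverlap pl m.1 = 0))
  ∨ (∃ m, b = some m ∧ s = pvOverlap pl m.1 ∧ 1 ≤ s ∧ acc = some m)

-- A's loop is: first substring hit, else the guarded first argmax of the overlaps
theorem pvMain (pl : String) (l : List (String × Int)) :
    ∀ (b : Option (String × Int)) (s : Int) (acc : Option (String × Int)), pvInv pl b s acc →
    pvLoopA pl l b s =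
      match l.find? (fun nr => PySem.Str.isIn nr.1 pl || PySem.Str.isIn pl nr.1) with
      | some nr => some nr
      | none =>
          match l.foldl (pvStep pl) acc with
          | some nr => if 1 ≤ pvOverlap pl nr.1 then some nr else none
          | none => none := by
  induction l with
  | nil =>
      intro b s acc hinv
      rcases hinv with ⟨hb, hs, hacc⟩ | ⟨m, hb, hs, h1, hacc⟩
      · subst hb; subst hs
        rcases hacc with h | ⟨m, h, hm⟩ <;> subst h
        · simp [pvLoopA, List.find?, List.foldl]
        · simp [pvLoopA, List.find?, List.foldl, hm]
      · subst hb; subst hacc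
        have h0 : (1:Int) ≤ pvOverlap pl m.1 := hs ▸ h1
        by_cases h2 : 2 ≤ s
        · simp [pvLoopA, List.find?, List.foldl, h2, h0]
        · have hs1 : s = 1 := by omega
          simp [pvLoopA, List.find?, List.foldl, hs1, h0]
  | cons x rest ih =>
      intro b s acc hinv
      rw [List.find?_cons]
      cases hsub : (PySem.Str.isIn x.1 pl || PySem.Str.isIn pl x.1) with
      | true => simp only [pvLoopA, hsub]; rfl
      | false =>
        simp only [pvLoopA, hsub, Bool.false_eq_true, if_false, List.foldl_cons]
        by_cases hlt : s < pvOverlap pl x.1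
        · rw [if_pos hlt]
          apply ih
          rcases hinv with ⟨hb, hs, hacc⟩ | ⟨m, hb, hs, h1, hacc⟩
          · right; refine ⟨x, rfl, rfl, ?_, ?_⟩
            · omega
            · rcases hacc with h | ⟨m, h, hm⟩ <;> subst h
              · rfl
              · subst hs
                have hx : pvOverlap pl m.1 < pvOverlap pl x.1 := by omega
                simp [pvStep, hx]
          · right; subst hb; subst hacc; subst hs
            refine ⟨x, rfl, rfl, by omega, by simp [pvStep, hlt]⟩
        · rw [if_neg hlt]
          apply ih
          rcases hinv with ⟨hb, hs, hacc⟩ | ⟨m, hb, hs, h1, hacc⟩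
          · left; subst hs
            refine ⟨hb, rfl, ?_⟩
            have hxn := pvOverlap_nonneg pl x.1
            have hx0 : pvOverlap pl x.1 = 0 := by omega
            rcases hacc with h | ⟨m, h, hm⟩ <;> subst h
            · exact Or.inr ⟨x, by simp [pvStep], hx0⟩
            · refine Or.inr ⟨m, ?_, hm⟩
              simp [pvStep, hm, hx0]
          · right; subst hb; subst hacc; subst hs
            exact ⟨m, rfl, rfl, h1, by simp [pvStep, hlt]⟩

-- ---- the inverted index is correct: per-entry counts are the overlaps ----

-- specification of the index list of word w when the build starts at index i0
def pvOcc : Nat → List (String × Int) → String → List Nat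
  | _, [], _ => []
  | i, nr :: rest, w => List.replicate ((PySem.Str.split₀ nr.1).count w) i ++ pvOcc (i + 1) rest w

theorem pvAddWords_getD (i : Nat) (ws : List String) :
    ∀ (d : PySem.Dict String (List Nat)) (w : String),
    (ws.foldl (pvAddWord i) d).getD w [] = d.getD w [] ++ List.replicate (ws.count w) i := by
  induction ws with
  | nil => intro d w; simp
  | cons u rest ih =>
      intro d w
      rw [List.foldl_cons, ih]
      by_cases hw : w = u
      · subst hw
        rw [List.count_cons_self, List.replicate_succ]
        simp [pvAddWord, PySem.Dict.getD_insert_self]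
      · have hc : (u :: rest).count w = rest.count w := by
          simp [Ne.symm hw]
        rw [hc]
        simp only [pvAddWord, PySem.Dict.getD_insert, if_neg hw]

theorem pvBuildIdx_getD :
    ∀ (its : List (String × Int)) (i0 : Nat) (d : PySem.Dict String (List Nat)) (w : String),
    (pvBuildIdx i0 its d).getD w [] = d.getD w [] ++ pvOcc i0 its w := by
  intro its
  induction its with
  | nil => intro i0 d w; simp [pvBuildIdx, pvOcc]
  | cons nr rest ih =>
      intro i0 d w
      rw [pvBuildIdx, ih, pvAddWords_getD, pvOcc, List.append_assoc]

theorem pvWordIndex_getD (w : String) : pvWordIndex.getD w [] = pvOcc 0 cghsRates w := by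
  rw [pvWordIndex, pvBuildIdx_getD]
  simp [PySem.Dict.getD_empty]

theorem pvOcc_mem_bounds :
    ∀ (its : List (String × Int)) (i0 : Nat) (w : String) (j : Nat),
    j ∈ pvOcc i0 its w → i0 ≤ j ∧ j < i0 + its.length := by
  intro its
  induction its with
  | nil => intro i0 w j h; simp [pvOcc] at h
  | cons nr rest ih =>
      intro i0 w j h
      rw [pvOcc, List.mem_append] at h
      rcases h with h | h
      · have := List.eq_of_mem_replicate h
        subst this; simp only [List.length_cons]; omega
      · have := ih (i0 + 1) w j h
        simp only [List.length_cons]; omega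

theorem pvOcc_count (w : String) :
    ∀ (its : List (String × Int)) (i0 j : Nat),
    (∀ nr ∈ its, (PySem.Str.split₀ nr.1).Nodup) → j < its.length →
    (pvOcc i0 its w).count (i0 + j) =
      if w ∈ PySem.Str.split₀ (its.getD j ("", 0)).1 then 1 else 0 := by
  intro its
  induction its with
  | nil => intro i0 j _ hj; simp at hj
  | cons nr rest ih =>
      intro i0 j hnd hj
      rw [pvOcc, List.count_append]
      cases j with
      | zero =>
          have hz : (pvOcc (i0 + 1) rest w).count (i0 + 0) = 0 := by
            rw [List.count_eq_zero]
            intro hmem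
            have := pvOcc_mem_bounds rest (i0 + 1) w (i0 + 0) hmem
            omega
          rw [hz]
          have hnr := hnd nr (by simp)
          have hle : (PySem.Str.split₀ nr.1).count w ≤ 1 :=
            List.nodup_iff_count_le_one.mp hnr w
          have hrep : (List.replicate ((PySem.Str.split₀ nr.1).count w) i0).count (i0 + 0) =
              (PySem.Str.split₀ nr.1).count w := by
            simp
          rw [hrep]
          by_cases hmem : w ∈ PySem.Str.split₀ nr.1
          · have h1 : 1 ≤ (PySem.Str.split₀ nr.1).count w := List.one_le_count_iff.mpr hmem
            simp only [List.getD, List.getElem?_cons_zero, Option.getD_some]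
            rw [if_pos hmem]; omega
          · have h0 : (PySem.Str.split₀ nr.1).count w = 0 := List.count_eq_zero.mpr hmem
            simp only [List.getD, List.getElem?_cons_zero, Option.getD_some]
            rw [if_neg hmem]; omega
      | succ j' =>
          have hrep : (List.replicate ((PySem.Str.split₀ nr.1).count w) i0).count (i0 + (j' + 1)) = 0 := by
            rw [List.count_replicate]
            simp only [beq_iff_eq]
            rw [if_neg (by omega)]
          rw [hrep]
          have := ih (i0 + 1) j' (fun nr h => hnd nr (List.mem_cons_of_mem _ h)) (by simpa using hj)
          have harith : i0 + 1 + j' = i0 + (j' + 1) := by omega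
          rw [harith] at this
          rw [this]
          simp

theorem pvBump_length (L : List Nat) : ∀ (v : List Int), (pvBump v L).length = v.length := by
  induction L with
  | nil => intro v; rfl
  | cons i rest ih => intro v; rw [pvBump, List.foldl_cons, ← pvBump, ih, List.length_set]

theorem pvBump_getD (L : List Nat) :
    ∀ (v : List Int) (j : Nat), (∀ i ∈ L, i < v.length) →
    (pvBump v L).getD j 0 = v.getD j 0 + (L.count j : Int) := by
  induction L with
  | nil => intro v j _; simp [pvBump]
  | cons i rest ih =>
      intro v j hbound
      rw [pvBump, List.foldl_cons, ← pvBump]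
      have hi : i < v.length := hbound i (by simp)
      rw [ih _ j (fun i' h => by rw [List.length_set]; exact hbound i' (by simp [h]))]
      have hset : (v.set i (v.getD i 0 + 1)).getD j 0 =
          if i = j then v.getD j 0 + 1 else v.getD j 0 := by
        simp only [List.getD_eq_getElem?_getD, List.getElem?_set]
        by_cases hij : i = j
        · subst hij; simp [hi]
        · simp [hij]
      rw [hset]
      by_cases hij : i = j
      · subst hij; rw [if_pos rfl, List.count_cons_self]; push_cast; ring
      · rw [if_neg hij]
        have hc : (i :: rest).count j = rest.count j := by
          simp [hij]
        rw [hc]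

theorem pvCountsFold_length (qw : List String) :
    ∀ (v : List Int),
    (qw.foldl (fun v w => pvBump v (pvWordIndex.getD w [])) v).length = v.length := by
  induction qw with
  | nil => intro v; rfl
  | cons u rest ih => intro v; rw [List.foldl_cons, ih, pvBump_length]

theorem pvCountsFold_getD (qw : List String) :
    ∀ (v : List Int) (j : Nat), v.length = cghsRates.length →
    (qw.foldl (fun v w => pvBump v (pvWordIndex.getD w [])) v).getD j 0 =
      v.getD j 0 + (qw.map (fun w => ((pvOcc 0 cghsRates w).count j : Int))).sum := by
  induction qw with
  | nil => intro v j _; simp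
  | cons u rest ih =>
      intro v j hlen
      rw [List.foldl_cons, ih _ j (by rw [pvBump_length]; exact hlen)]
      have hbound : ∀ i ∈ pvWordIndex.getD u [], i < v.length := by
        intro i h
        rw [pvWordIndex_getD] at h
        have := pvOcc_mem_bounds cghsRates 0 u i h
        omega
      rw [pvBump_getD _ _ j hbound, pvWordIndex_getD]
      simp [add_assoc]

-- A's set-intersection overlap counted from the query side
theorem pvOverlap_eq_countP (q n : String) :
    pvOverlap q n =
      ((PySem.Set.ofList (PySem.Str.split₀ q)).countP
        (fun w => decide (w ∈ PySem.Str.split₀ n)) : Int) := by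
  unfold pvOverlap
  rw [PySem.Set.len, List.countP_eq_length_filter]
  congr 1
  apply List.Perm.length_eq
  rw [List.perm_ext_iff_of_nodup]
  · intro x
    simp only [PySem.Set.inter, List.mem_filter, PySem.Set.contains_eq_listContains,
      List.contains_iff_mem, PySem.Set.mem_ofList, decide_eq_true_eq]
    tauto
  · exact List.Nodup.filter _ (PySem.Set.nodup_ofList _)
  · exact List.Nodup.filter _ (PySem.Set.nodup_ofList _)

theorem pvCounts_eq (q : String) :
    pvCounts q = cghsRates.map (fun nr => pvOverlap q nr.1) := by
  have hnd : ∀ nr ∈ cghsRates, (PySem.Str.split₀ nr.1).Nodup := by decide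
  have hlen : (pvCounts q).length = cghsRates.length := by
    rw [pvCounts, pvCountsFold_length, List.length_replicate]
  apply List.ext_getElem
  · rw [hlen, List.length_map]
  · intro j hj hj'
    have hjlt : j < cghsRates.length := by rwa [hlen] at hj
    rw [← List.getD_eq_getElem (pvCounts q) 0 hj, ← List.getD_eq_getElem _ 0 hj']
    rw [pvCounts, pvCountsFold_getD _ _ j (by simp)]
    have hrep : (List.replicate cghsRates.length (0 : Int)).getD j 0 = 0 := by
      simp [List.getD_eq_getElem?_getD, hjlt]
    rw [hrep, zero_add]
    have hcnt : ∀ w, (pvOcc 0 cghsRates w).count j =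
        if w ∈ PySem.Str.split₀ (cghsRates.getD j ("", 0)).1 then 1 else 0 := by
      intro w
      have := pvOcc_count w cghsRates 0 j hnd hjlt
      simpa using this
    have hmap : (PySem.Set.ofList (PySem.Str.split₀ q)).map
          (fun w => ((pvOcc 0 cghsRates w).count j : Int)) =
        (PySem.Set.ofList (PySem.Str.split₀ q)).map
          (fun w => if decide (w ∈ PySem.Str.split₀ (cghsRates.getD j ("", 0)).1) = true then 1 else 0) := by
      apply List.map_congr_left
      intro w _
      rw [hcnt w]
      simp
    rw [hmap, PySem.List.sum_map_ite_one_zero, ← pvOverlap_eq_countP]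
    rw [List.getD_eq_getElem _ _ (by simpa using hjlt)]
    simp [List.getElem?_eq_getElem hjlt]

-- B's argmax scan over the counts equals the guarded first-argmax fold
theorem pvScan (pl : String) (l : List (String × Int)) :
    ∀ (b : Option (String × Int)) (c : Int) (acc : Option (String × Int)), pvInv pl b c acc →
    (if 1 ≤ ((l.zip (l.map (fun nr => pvOverlap pl nr.1))).foldl
        (fun (st : Option (String × Int) × Int) p => if st.2 < p.2 then (some p.1, p.2) else st)
        (b, c)).2
     then ((l.zip (l.map (fun nr => pvOverlap pl nr.1))).foldl
        (fun (st : Option (String × Int) × Int) p => if st.2 < p.2 then (some p.1, p.2) else st)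
        (b, c)).1
     else none)
    = match l.foldl (pvStep pl) acc with
      | some nr => if 1 ≤ pvOverlap pl nr.1 then some nr else none
      | none => none := by
  induction l with
  | nil =>
      intro b c acc hinv
      rcases hinv with ⟨hb, hc, hacc⟩ | ⟨m, hb, hc, h1, hacc⟩
      · subst hb; subst hc
        rcases hacc with h | ⟨m, h, hm⟩ <;> subst h
        · simp
        · simp [hm]
      · subst hb; subst hacc; subst hc
        simp [h1]
  | cons x rest ih =>
      intro b c acc hinv
      rw [List.map_cons, List.zip_cons_cons, List.foldl_cons, List.foldl_cons]
      by_cases hlt : c < pvOverlap pl x.1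
      · simp only [if_pos hlt]
        apply ih
        rcases hinv with ⟨hb, hc, hacc⟩ | ⟨m, hb, hc, h1, hacc⟩
        · right; refine ⟨x, rfl, rfl, by omega, ?_⟩
          rcases hacc with h | ⟨m, h, hm⟩ <;> subst h
          · rfl
          · subst hc
            have hx : pvOverlap pl m.1 < pvOverlap pl x.1 := by omega
            simp [pvStep, hx]
        · right; subst hb; subst hacc; subst hc
          refine ⟨x, rfl, rfl, by omega, by simp [pvStep, hlt]⟩
      · simp only [if_neg hlt]
        apply ih
        rcases hinv with ⟨hb, hc, hacc⟩ | ⟨m, hb, hc, h1, hacc⟩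
        · left; subst hc
          refine ⟨hb, rfl, ?_⟩
          have hxn := pvOverlap_nonneg pl x.1
          have hx0 : pvOverlap pl x.1 = 0 := by omega
          rcases hacc with h | ⟨m, h, hm⟩ <;> subst h
          · exact Or.inr ⟨x, by simp [pvStep], hx0⟩
          · refine Or.inr ⟨m, ?_, hm⟩
            simp [pvStep, hm, hx0]
        · right; subst hb; subst hacc; subst hc
          exact ⟨m, rfl, rfl, h1, by simp [pvStep, hlt]⟩

-- ===== VERDICT (by name: the statement is the Claim_ definition above) =====
theorem get_cghs_rate_spec : Claim_equal_get_cghs_rate := by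
  intro pn _
  unfold Spec_get_cghs_rate
  simp only [get_cghs_rate, get_cghs_rate_alt]
  generalize PySem.Str.strip (PySem.Str.lower pn) = pl
  rw [pvMain pl cghsRates none 0 none (Or.inl ⟨rfl, rfl, Or.inl rfl⟩), pvCounts_eq]
  cases hf : cghsRates.find? (fun nr => PySem.Str.isIn nr.1 pl || PySem.Str.isIn pl nr.1) with
  | some nr => rfl
  | none => exact (pvScan pl cghsRates none 0 none (Or.inl ⟨rfl, rfl, Or.inl rfl⟩)).symm
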